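-- pv_equiv track=rewrite | github.com/mir-group/flare | paper/Cutoff_Calibration/Extrapolate/struc.py | get_unique_species
-- ===== SOURCE A (Python) =====
-- def get_unique_species(species):
--     unique_species = []
--     coded_species = []
--     for spec in species:
--         if spec in unique_species:
--             coded_species.append(unique_species.index(spec))
--         else:
--             coded_species.append(len(unique_species))
--             unique_species.append(spec)
--
--     return unique_species, coded_species
-- ===== SOURCE B (Python) =====
-- def get_unique_species(species):
--     # Stateless definitional formulation: an element is unique iff it has no
--     # earlier occurrence; its code is the number of distinct species appearing
--     # strictly before its first occurrence.
--     unique_species = [s for i, s in enumerate(species) if s not in species[:i]]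
--     coded_species = [len(set(species[:species.index(s)])) for s in species]
--     return unique_species, coded_species
-- ===== Notes on version B (the rewrite author's own statement) =====
-- stated objective: alternative
-- what changed: Replaces A's incremental single pass with a growing unique-list accumulator by a stateless definitional formulation: unique = elements with no earlier occurrence (prefix-slice membership test), and each code recomputed as the number of distinct species strictly before the element's first occurrence (len(set(prefix))).
import Mathlib
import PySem

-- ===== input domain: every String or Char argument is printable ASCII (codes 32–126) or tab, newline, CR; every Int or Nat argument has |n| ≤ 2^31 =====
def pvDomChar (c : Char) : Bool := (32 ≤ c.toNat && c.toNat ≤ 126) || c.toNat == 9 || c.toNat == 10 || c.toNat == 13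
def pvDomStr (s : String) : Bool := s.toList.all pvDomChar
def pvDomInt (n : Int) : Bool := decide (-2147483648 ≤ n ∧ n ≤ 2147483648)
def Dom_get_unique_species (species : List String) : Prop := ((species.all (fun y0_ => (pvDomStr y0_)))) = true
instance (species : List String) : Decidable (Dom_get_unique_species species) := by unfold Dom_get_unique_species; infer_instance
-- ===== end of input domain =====

-- B replaces A's incremental accumulator loop by a stateless definitional formulation
-- (prefix-slice recomputation); alternative decomposition, not claimed faster.

-- ===== PORT A =====
-- literal port of A's loop: one pass keeping (unique_species, coded_species)
def get_unique_species (species : List String) : List String × List Int :=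
  species.foldl
    (fun (st : List String × List Int) spec =>
      if spec ∈ st.1 then
        (st.1, st.2 ++ [(((PySem.List.index? st.1 spec).getD 0 : Nat) : Int)])
      else
        (st.1 ++ [spec], st.2 ++ [(st.1.length : Int)]))
    ([], [])

-- ===== PORT B =====
-- [s for i, s in enumerate(species) if s not in species[:i]]  and
-- [len(set(species[:species.index(s)])) for s in species]
-- (species.index(s) cannot raise: s is drawn from species, so .getD 0 is never taken)
def get_unique_species_alt (species : List String) : List String × List Int :=
  let unique :=
    ((PySem.List.enumerate species).filter
      (fun p => !decide (p.2 ∈ PySem.List.slice species none (some p.1)))).map Prod.snd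
  let coded := species.map (fun s =>
    ((PySem.Set.ofList (PySem.List.slice species none
        (some (((PySem.List.index? species s).getD 0 : Nat) : Int)))).length : Int))
  (unique, coded)

-- ===== PRECONDITION & SPEC =====
def Spec_get_unique_species (species : List String) (out : List String × List Int) : Prop := out = get_unique_species_alt species
instance (species : List String) (out : List String × List Int) : Decidable (Spec_get_unique_species species out) := by unfold Spec_get_unique_species; infer_instance

-- ===== CLAIM (what is proved, stated in full; the proofs are below) =====
def Claim_equal_get_unique_species : Prop := ∀ (species : List String), Dom_get_unique_species species → Spec_get_unique_species species (get_unique_species species)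

-- ===== LEMMAS AND PROOFS =====

-- accumulating Set.add only appends: the accumulator is a prefix of the result
lemma foldl_add_prefix (l : List String) : ∀ (u : List String), ∃ t, l.foldl PySem.Set.add u = u ++ t := by
  induction l with
  | nil => intro u; exact ⟨[], by simp⟩
  | cons x l ih =>
    intro u
    by_cases hx : x ∈ u
    · obtain ⟨t, ht⟩ := ih u
      exact ⟨t, by simpa [PySem.Set.add_of_mem hx] using ht⟩
    · obtain ⟨t, ht⟩ := ih (u ++ [x])
      exact ⟨[x] ++ t, by simpa [PySem.Set.add_of_not_mem hx, List.append_assoc] using ht⟩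

-- A's loop, generalized: the unique accumulator evolves by Set.add, and every coded
-- entry equals the index of its element in the FINAL unique list
lemma a_loop (l : List String) : ∀ (u : List String) (c : List Int),
    l.foldl
      (fun (st : List String × List Int) spec =>
        if spec ∈ st.1 then
          (st.1, st.2 ++ [(((PySem.List.index? st.1 spec).getD 0 : Nat) : Int)])
        else
          (st.1 ++ [spec], st.2 ++ [(st.1.length : Int)]))
      (u, c)
    = (l.foldl PySem.Set.add u,
       c ++ l.map (fun s => (((PySem.List.index? (l.foldl PySem.Set.add u) s).getD 0 : Nat) : Int))) := by
  induction l with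
  | nil => intro u c; simp
  | cons x l ih =>
    intro u c
    simp only [List.foldl_cons, List.map_cons]
    by_cases hx : x ∈ u
    · rw [if_pos hx, ih, PySem.Set.add_of_mem hx]
      obtain ⟨t, ht⟩ := foldl_add_prefix l u
      have hidx : PySem.List.index? (l.foldl PySem.Set.add u) x = PySem.List.index? u x := by
        rw [ht]; exact PySem.List.index?_append_of_mem t hx
      rw [hidx]
      simp
    · rw [if_neg hx, ih, PySem.Set.add_of_not_mem hx]
      obtain ⟨t, ht⟩ := foldl_add_prefix l (u ++ [x])
      have hidx : PySem.List.index? (l.foldl PySem.Set.add (u ++ [x])) x = some u.length := by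
        rw [ht, PySem.List.index?_append_of_mem t (by simp),
           PySem.List.index?_append_singleton_self u x hx]
      rw [hidx]
      simp

-- B's unique pass, generalized: filtering the suffix l (at offset |pre|) of the full
-- list pre ++ l by "no earlier occurrence" yields exactly the new part of foldl Set.add
lemma b_unique (l : List String) : ∀ (pre u : List String), (∀ s, s ∈ pre ↔ s ∈ u) →
    ((PySem.List.enumerate l (pre.length : Int)).filter
      (fun p => !decide (p.2 ∈ PySem.List.slice (pre ++ l) none (some p.1)))).map Prod.snd
    = (l.foldl PySem.Set.add u).drop u.length := by
  induction l with
  | nil => intro pre u h; simp [PySem.List.enumerate_nil]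
  | cons x xs ih =>
    intro pre u h
    rw [PySem.List.enumerate_cons]
    have hslice : PySem.List.slice (pre ++ x :: xs) none (some (pre.length : Int)) = pre := by
      rw [PySem.List.slice_to_natCast]; exact List.take_left
    have hcast : (pre.length : Int) + 1 = ((pre ++ [x]).length : Int) := by simp
    by_cases hx : x ∈ u
    · have hfilter : (!decide (x ∈ PySem.List.slice (pre ++ x :: xs) none (some (pre.length : Int)))) = false := by
        simp [hslice, (h x).mpr hx]
      have hpre : pre ++ x :: xs = (pre ++ [x]) ++ xs := by simp
      rw [List.filter_cons, hfilter, hcast, hpre]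
      simp only [Bool.false_eq_true, if_false]
      rw [ih (pre ++ [x]) u (by
            intro s
            simp only [List.mem_append, List.mem_singleton]
            constructor
            · rintro (hs | rfl)
              · exact (h s).mp hs
              · exact hx
            · intro hs; exact Or.inl ((h s).mpr hs)),
          List.foldl_cons, PySem.Set.add_of_mem hx]
    · have hfilter : (!decide (x ∈ PySem.List.slice (pre ++ x :: xs) none (some (pre.length : Int)))) = true := by
        simp [hslice]; intro hc; exact hx ((h x).mp hc)
      have hpre : pre ++ x :: xs = (pre ++ [x]) ++ xs := by simp
      rw [List.filter_cons, hfilter, hcast, hpre]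
      simp only [if_true]
      rw [List.map_cons,
          ih (pre ++ [x]) (u ++ [x]) (by intro s; simp [List.mem_append, h s]),
          List.foldl_cons, PySem.Set.add_of_not_mem hx]
      obtain ⟨t, ht⟩ := foldl_add_prefix xs (u ++ [x])
      rw [ht]
      have h1 : (u ++ [x]) ++ t = u ++ (x :: t) := by simp
      rw [h1, List.drop_left' rfl]
      have h2 : (u ++ [x]).length = u.length + 1 := by simp
      rw [h2]
      have h3 : u ++ x :: t = (u ++ [x]) ++ t := by simp
      rw [h3, List.drop_append_of_le_length (by simp)]
      simp

-- B's code of s (distinct count of the prefix before s's first occurrence), generalized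
-- over the seen-accumulator, equals s's index in the final accumulated unique list
lemma b_code (l : List String) : ∀ (u : List String) (s : String), s ∈ l → s ∉ u →
    (PySem.List.index? (l.foldl PySem.Set.add u) s).getD 0
    = ((l.take ((PySem.List.index? l s).getD 0)).foldl PySem.Set.add u).length := by
  induction l with
  | nil => intro u s hs; exact absurd hs (by simp)
  | cons x xs ih =>
    intro u s hs hu
    by_cases hsx : s = x
    · subst hsx
      rw [PySem.List.index?_cons_self]
      simp only [Option.getD_some, List.take_zero, List.foldl_nil, List.foldl_cons]
      rw [PySem.Set.add_of_not_mem hu]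
      obtain ⟨t, ht⟩ := foldl_add_prefix xs (u ++ [s])
      rw [ht, PySem.List.index?_append_of_mem t (by simp),
          PySem.List.index?_append_singleton_self u s hu]
      simp
    · have hsxs : s ∈ xs := by rcases List.mem_cons.mp hs with h | h; exact absurd h hsx; exact h
      have hsome : (PySem.List.index? xs s).isSome := by
        rw [PySem.List.index?_isSome_iff]; exact hsxs
      obtain ⟨j, hj⟩ := Option.isSome_iff_exists.mp hsome
      rw [PySem.List.index?_cons_of_ne xs (fun h => hsx h.symm), hj]
      simp only [Option.map_some, Option.getD_some, List.foldl_cons]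
      have hsu' : s ∉ PySem.Set.add u x := by
        unfold PySem.Set.add
        split
        · exact hu
        · simp [hu, hsx]
      have := ih (PySem.Set.add u x) s hsxs hsu'
      rw [hj] at this
      simp only [Option.getD_some] at this
      rw [this]
      have : (x :: xs).take (j + 1) = x :: xs.take j := by simp
      rw [this, List.foldl_cons]

-- ===== VERDICT (by name: the statement is the Claim_ definition above) =====
theorem get_unique_species_spec : Claim_equal_get_unique_species := by
  intro species _
  show get_unique_species species = get_unique_species_alt species
  unfold get_unique_species get_unique_species_alt
  rw [a_loop]
  refine Prod.ext ?_ ?_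
  · show species.foldl PySem.Set.add [] = _
    have := b_unique species [] [] (by simp)
    simpa using this.symm
  · show List.map _ species = List.map _ species
    apply List.map_congr_left
    intro s hs
    have hb := b_code species [] s hs (by simp)
    have hj : PySem.List.slice species none
        (some (((PySem.List.index? species s).getD 0 : Nat) : Int))
        = species.take ((PySem.List.index? species s).getD 0) := by
      exact PySem.List.slice_to_natCast species _
    rw [hj, PySem.Set.ofList_eq_foldl, ← hb]
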